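-- pv_equiv track=rewrite | github.com/djaffer/Algorithm-Design | rabbit-max-carrot/rabbit-meal-carrot-optimization.py | search_carrots
-- ===== SOURCE A (Python) =====
-- def search_carrots(garden, row, col):
--     maxcarrots = 0
--     nr = -1
--     nc = -1
--
--     for r in [-1,0,1]:
--       for c in [-1,0,1]:
--         if row + r >= 0 and row + r < len(garden) and \
--                 col + c >= 0 and col + c < len(garden[row]):
--             if garden[row + r][col + c] > maxcarrots:
--                 maxcarrots = garden[row + r][col + c]
--                 nr = row + r
--                 nc = col + c
--
--     numofcarrots = garden[row][col]
--     garden[row][col] = 0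
--
--     if  nr != -1 and nc != -1 and maxcarrots > 0:
--         numofcarrots += search_carrots(garden, nr, nc)
--
--     return numofcarrots
-- ===== SOURCE B (Python) =====
-- def search_carrots(garden, row, col):
--     # Iterative re-implementation: explicit loop with a total accumulator; each
--     # step builds the in-bounds 3x3 candidate list (same scan order, centre
--     # included) and picks the first maximum via max()/index() instead of A's
--     # running strict-> accumulator recursion.  Mutates garden like A (zeroes
--     # visited cells); equivalence is about the return value.
--     total = 0
--     while True:
--         cands = [(row + r, col + c)
--                  for r in (-1, 0, 1) for c in (-1, 0, 1)
--                  if 0 <= row + r < len(garden) and 0 <= col + c < len(garden[row])]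
--         vals = [garden[rr][cc] for rr, cc in cands]
--         total += garden[row][col]
--         garden[row][col] = 0
--         m = max(vals, default=0)
--         if m > 0:
--             row, col = cands[vals.index(m)]
--         else:
--             return total
-- ===== Notes on version B (the rewrite author's own statement) =====
-- stated objective: alternative
-- what changed: Replaces A's recursion and running strict-> accumulator scan by an explicit while-loop with a total accumulator that builds the in-bounds 3x3 candidate list and picks the first maximum via max()/index(), avoiding Python recursion depth.
-- outside the precondition, e.g. on search_carrots([[2], [0, 9]], 0, 0): A returns 2, B returns 2
import Mathlib
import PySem

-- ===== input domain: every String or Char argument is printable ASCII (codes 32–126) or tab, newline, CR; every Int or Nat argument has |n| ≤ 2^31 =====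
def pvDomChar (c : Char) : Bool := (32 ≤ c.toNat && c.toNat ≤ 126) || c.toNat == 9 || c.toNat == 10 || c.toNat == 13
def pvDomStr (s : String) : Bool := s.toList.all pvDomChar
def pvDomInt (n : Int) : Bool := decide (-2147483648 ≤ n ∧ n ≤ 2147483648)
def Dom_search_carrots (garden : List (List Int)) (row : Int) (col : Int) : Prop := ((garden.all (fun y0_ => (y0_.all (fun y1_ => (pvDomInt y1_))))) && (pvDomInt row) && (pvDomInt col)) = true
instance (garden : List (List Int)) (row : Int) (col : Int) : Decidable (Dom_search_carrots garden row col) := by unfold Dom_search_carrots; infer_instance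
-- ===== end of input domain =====

-- B replaces A's recursion + running strict-> scan by an iterative loop that picks the
-- first maximum of the candidate list via max()/index(); return-value equivalence only
-- (both Pythons zero the visited cells of `garden` in place, in the same way).


-- shared primitives (Python index with negative wraparound, cell read, cell write,
-- count of positive cells used as fuel)
def pvIx (n : Nat) (i : Int) : Nat := if i < 0 then ((n : Int) + i).toNat else i.toNat

def pvRow (g : List (List Int)) (r : Int) : List Int := g.getD (pvIx g.length r) []

def pvGet2 (g : List (List Int)) (r c : Int) : Int :=
  (pvRow g r).getD (pvIx (pvRow g r).length c) 0

def pvSet2 (g : List (List Int)) (r c v : Int) : List (List Int) :=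
  g.set (pvIx g.length r) ((pvRow g r).set (pvIx (pvRow g r).length c) v)

def pvCountPos (g : List (List Int)) : Nat :=
  (g.map (fun row => row.countP (fun x => decide (0 < x)))).sum

-- A's in-bounds test: note the column bound uses the CURRENT row's length, as in the Python
def pvInB (g : List (List Int)) (row rr cc : Int) : Bool :=
  decide (0 ≤ rr) && decide (rr < (g.length : Int)) &&
  decide (0 ≤ cc) && decide (cc < ((pvRow g row).length : Int))

-- ===== PORT A =====
-- the inner 'for c' loop of A's scan
def pvScanInner (g : List (List Int)) (row col r : Int) (st : Int × Int × Int) : Int × Int × Int :=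
  ([-1, 0, 1] : List Int).foldl (fun st c =>
    if pvInB g row (row + r) (col + c) && decide (pvGet2 g (row + r) (col + c) > st.1)
    then (pvGet2 g (row + r) (col + c), row + r, col + c) else st) st

-- the nested for r/for c scan with the running strict-> accumulator (maxcarrots, nr, nc)
def pvScanA (g : List (List Int)) (row col : Int) : Int × Int × Int :=
  ([-1, 0, 1] : List Int).foldl (fun st r => pvScanInner g row col r st) (0, -1, -1)

-- A's recursion; the fuel is a totalization device only (both Pythons terminate,
-- and on the inputs Pre_ admits the fuel is never exhausted)
def pvRecA : Nat → List (List Int) → Int → Int → Int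
  | 0, _, _, _ => 0
  | f + 1, g, row, col =>
    let s := pvScanA g row col
    let numof := pvGet2 g row col
    let g' := pvSet2 g row col 0
    if s.2.1 ≠ -1 ∧ s.2.2 ≠ -1 ∧ s.1 > 0 then numof + pvRecA f g' s.2.1 s.2.2 else numof

def search_carrots (garden : List (List Int)) (row : Int) (col : Int) : Int :=
  pvRecA (2 * pvCountPos garden + 3) garden row col

-- ===== PORT B =====
-- B's candidate comprehension, in the same scan order
def pvCandsB (g : List (List Int)) (row col : Int) : List (Int × Int) :=
  ([-1, 0, 1] : List Int).flatMap (fun r =>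
    ([-1, 0, 1] : List Int).filterMap (fun c =>
      if pvInB g row (row + r) (col + c) then some (row + r, col + c) else none))

-- B's while-loop with the total accumulator; same fuel device
def pvLoopB : Nat → List (List Int) → Int → Int → Int → Int
  | 0, _, _, _, total => total
  | f + 1, g, row, col, total =>
    let cands := pvCandsB g row col
    let vals := cands.map (fun p => pvGet2 g p.1 p.2)
    let total' := total + pvGet2 g row col
    let g' := pvSet2 g row col 0
    let m := (PySem.List.max? vals (fun x => x)).getD 0
    if m > 0 then
      let p := cands.getD ((PySem.List.index? vals m).getD 0) (0, 0)
      pvLoopB f g' p.1 p.2 total'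
    else total'

def search_carrots_alt (garden : List (List Int)) (row : Int) (col : Int) : Int :=
  pvLoopB (2 * pvCountPos garden + 3) garden row col 0

-- ===== PRECONDITION & SPEC =====
-- Pre_ excludes non-rectangular gardens and start indices outside Python's (wraparound)
-- range: there the Python can raise IndexError mid-walk, depending on which cells it visits.
def Pre_search_carrots (garden : List (List Int)) (row : Int) (col : Int) : Prop :=
  -(garden.length : Int) ≤ row ∧ row < (garden.length : Int) ∧
  -((garden.getD 0 []).length : Int) ≤ col ∧ col < ((garden.getD 0 []).length : Int) ∧
  ∀ r ∈ garden, r.length = (garden.getD 0 []).length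

instance (garden : List (List Int)) (row : Int) (col : Int) : Decidable (Pre_search_carrots garden row col) := by
  unfold Pre_search_carrots; infer_instance

def pvWitness_search_carrots : List (List Int) × Int × Int := ([[1, 2], [3, 4]], 0, 0)

def Spec_search_carrots (garden : List (List Int)) (row : Int) (col : Int) (out : Int) : Prop := out = search_carrots_alt garden row col
instance (garden : List (List Int)) (row : Int) (col : Int) (out : Int) : Decidable (Spec_search_carrots garden row col out) := by unfold Spec_search_carrots; infer_instance

-- ===== CLAIM (what is proved, stated in full; the proofs are below) =====
def Claim_equal_search_carrots : Prop := ∀ (garden : List (List Int)) (row : Int) (col : Int), Dom_search_carrots garden row col → Pre_search_carrots garden row col → Spec_search_carrots garden row col (search_carrots garden row col)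

-- ===== LEMMAS AND PROOFS =====

-- generic: a guarded fold over a list is a plain fold over the filtered-and-mapped list
theorem foldl_guard_filterMap {α β σ : Type} (l : List α) (p : α → Bool) (g : α → β)
    (f : σ → β → σ) (s : σ) :
    l.foldl (fun st x => if p x then f st (g x) else st) s =
      (l.filterMap (fun x => if p x then some (g x) else none)).foldl f s := by
  induction l generalizing s with
  | nil => rfl
  | cons x t ih => cases h : p x <;> simp [h, ih]

-- the running max / first-attainer characterisation of A's scan, over any list
def pvRunMax {α : Type} (v : α → Int) (l : List α) (st : Int × α) : Int × α :=
  l.foldl (fun st p => if v p > st.1 then (v p, p) else st) st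

theorem pvRunMax_cons {α : Type} (v : α → Int) (x : α) (t : List α) (st : Int × α) :
    pvRunMax v (x :: t) st = pvRunMax v t (if v x > st.1 then (v x, x) else st) := rfl

theorem runMax_fst {α : Type} (v : α → Int) (l : List α) (m0 : Int) (p0 : α) :
    (pvRunMax v l (m0, p0)).1 = l.foldl (fun m p => max m (v p)) m0 := by
  induction l generalizing m0 p0 with
  | nil => rfl
  | cons x t ih =>
    simp only [pvRunMax, List.foldl_cons] at *
    by_cases h : v x > m0
    · rw [if_pos (by exact h), show max m0 (v x) = v x by omega, ih]
    · rw [if_neg (by exact h), show max m0 (v x) = m0 by omega, ih]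

theorem runMax_const {α : Type} (v : α → Int) (l : List α) (m0 : Int) (p0 : α)
    (h : ∀ x ∈ l, v x ≤ m0) : pvRunMax v l (m0, p0) = (m0, p0) := by
  induction l with
  | nil => rfl
  | cons x t ih =>
    have hx := h x (by simp)
    simp only [pvRunMax, List.foldl_cons]
    rw [if_neg (by omega)]
    exact ih fun y hy => h y (List.mem_cons_of_mem _ hy)

theorem foldl_max_shift (l : List Int) (a b : Int) :
    l.foldl max (max a b) = max a (l.foldl max b) := by
  induction l generalizing b with
  | nil => rfl
  | cons x t ih => simp only [List.foldl_cons, max_assoc, ih]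

theorem runMax_find {α : Type} (v : α → Int) (l : List α) (m0 : Int) (p0 d : α) (M : Int)
    (hM : l.foldl (fun m p => max m (v p)) m0 = M) (h : M > m0) :
    pvRunMax v l (m0, p0) = (M, (l.find? (fun p => decide (v p = M))).getD d) := by
  induction l generalizing m0 p0 with
  | nil => simp only [List.foldl_nil] at hM; omega
  | cons x t ih =>
    simp only [List.foldl_cons] at hM
    by_cases hx : v x > m0
    · rw [show max m0 (v x) = v x by omega] at hM
      rw [pvRunMax_cons, if_pos (by exact hx)]
      by_cases hMx : M > v x
      · rw [ih (v x) x hM hMx, List.find?_cons_of_neg (by simp; omega)]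
      · have hMeq : M = v x := by
          have h1 : (v x) ≤ (t.map v).foldl max (v x) := (PySem.List.le_foldl_max (t.map v) (v x)).1
          rw [List.foldl_map] at h1
          omega
        have hall : ∀ y ∈ t, v y ≤ v x := by
          intro y hy
          have h2 := (PySem.List.le_foldl_max (t.map v) (v x)).2 (v y)
            (List.mem_map.mpr ⟨y, hy, rfl⟩)
          rw [List.foldl_map, hM] at h2
          omega
        rw [runMax_const v t (v x) x hall, List.find?_cons_of_pos (by simp [hMeq]), hMeq]
        rfl
    · rw [show max m0 (v x) = m0 by omega] at hM
      rw [pvRunMax_cons, if_neg (by exact hx), ih m0 p0 hM h,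
          List.find?_cons_of_neg (by simp; omega)]

-- B's cands[vals.index(m)] is the first attainer of m
theorem getD_index_map {α : Type} (v : α → Int) (l : List α) (m : Int) (d : α)
    (hm : m ∈ l.map v) :
    l.getD ((PySem.List.index? (l.map v) m).getD 0) d =
      (l.find? (fun p => decide (v p = m))).getD d := by
  induction l with
  | nil => simp at hm
  | cons x t ih =>
    by_cases hx : v x = m
    · rw [show (x :: t).map v = m :: t.map v by simp [hx],
          PySem.List.index?_cons_self, List.find?_cons_of_pos (by simp [hx])]
      rfl
    · have hm' : m ∈ t.map v := by
        rw [List.map_cons] at hm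
        rcases List.mem_cons.mp hm with h1 | h1
        · exact absurd h1.symm hx
        · exact h1
      rw [List.map_cons, PySem.List.index?_cons_of_ne (t.map v) hx,
          List.find?_cons_of_neg (by simp [hx])]
      rcases Option.isSome_iff_exists.mp ((PySem.List.index?_isSome_iff (t.map v) m).mpr hm') with ⟨k, hk⟩
      have hrec := ih hm'
      rw [hk] at hrec
      rw [hk]
      simpa using hrec

-- the inner 'for c' loop of A's scan, as a fold over the filtered candidates of this r
theorem inner_eq (g : List (List Int)) (row col r : Int) (st : Int × Int × Int) :
    pvScanInner g row col r st =
      (([-1, 0, 1] : List Int).filterMap (fun c =>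
          if pvInB g row (row + r) (col + c) then some (row + r, col + c) else none)).foldl
        (fun st p => if pvGet2 g p.1 p.2 > st.1 then (pvGet2 g p.1 p.2, p.1, p.2) else st) st := by
  rw [pvScanInner, ← foldl_guard_filterMap ([-1, 0, 1] : List Int)
        (fun c => pvInB g row (row + r) (col + c)) (fun c => (row + r, col + c))]
  apply PySem.List.foldl_congr_mem
  intro acc c _
  by_cases hb : pvInB g row (row + r) (col + c) = true <;> simp [hb]

-- A's scan is the running first-max fold over B's candidate list
theorem scanA_eq (g : List (List Int)) (row col : Int) :
    pvScanA g row col =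
      pvRunMax (fun p : Int × Int => pvGet2 g p.1 p.2) (pvCandsB g row col) (0, (-1, -1)) := by
  simp only [pvScanA, pvCandsB, pvRunMax, List.flatMap_cons, List.flatMap_nil, List.append_nil,
    List.foldl_append, List.foldl_cons, List.foldl_nil]
  rw [inner_eq, inner_eq, inner_eq]

-- every candidate has non-negative coordinates
theorem cands_nonneg (g : List (List Int)) (row col : Int) :
    ∀ p ∈ pvCandsB g row col, 0 ≤ p.1 ∧ 0 ≤ p.2 := by
  intro p hp
  simp only [pvCandsB, List.mem_flatMap, List.mem_filterMap] at hp
  rcases hp with ⟨r, _, c, _, hc⟩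
  by_cases hb : pvInB g row (row + r) (col + c) = true
  · rw [if_pos hb] at hc
    cases hc
    simp only [pvInB, Bool.and_eq_true, decide_eq_true_eq] at hb
    exact ⟨hb.1.1.1, hb.1.2⟩
  · rw [if_neg hb] at hc; cases hc

-- one step of the two programs agrees (branch condition and next cell)
theorem step_char (g : List (List Int)) (row col : Int) :
    ((pvScanA g row col).2.1 ≠ -1 ∧ (pvScanA g row col).2.2 ≠ -1 ∧ (pvScanA g row col).1 > 0 ↔
      (PySem.List.max? ((pvCandsB g row col).map (fun p => pvGet2 g p.1 p.2)) (fun x => x)).getD 0 > 0) ∧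
    ((PySem.List.max? ((pvCandsB g row col).map (fun p => pvGet2 g p.1 p.2)) (fun x => x)).getD 0 > 0 →
      (pvScanA g row col).2 =
        (pvCandsB g row col).getD
          ((PySem.List.index? ((pvCandsB g row col).map (fun p => pvGet2 g p.1 p.2))
              ((PySem.List.max? ((pvCandsB g row col).map (fun p => pvGet2 g p.1 p.2)) (fun x => x)).getD 0)).getD 0)
          (0, 0)) := by
  rw [scanA_eq]
  cases hc : pvCandsB g row col with
  | nil =>
    rw [List.map_nil, (PySem.List.max?_eq_none_iff ([] : List Int) (fun x => x)).mpr rfl]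
    simp [pvRunMax]
  | cons x t =>
    set v : Int × Int → Int := fun p => pvGet2 g p.1 p.2 with hv
    have hmax : PySem.List.max? ((x :: t).map v) (fun x => x) = some ((t.map v).foldl max (v x)) := by
      rw [List.map_cons]
      exact PySem.List.max?_id_cons (v x) (t.map v)
    set m : Int := (t.map v).foldl max (v x) with hm
    have hfoldm : (x :: t).foldl (fun a p => max a (v p)) 0 = max 0 m := by
      rw [show (x :: t).foldl (fun a p => max a (v p)) 0 = ((x :: t).map v).foldl max 0 by
            rw [List.foldl_map], List.map_cons, List.foldl_cons, foldl_max_shift]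
    have hfst : (pvRunMax v (x :: t) (0, (-1, -1))).1 = max 0 m := by
      rw [runMax_fst, hfoldm]
    rw [hmax]
    simp only [Option.getD_some]
    by_cases hpos : m > 0
    · have hrun := runMax_find v (x :: t) 0 (-1, -1) (0, 0) (max 0 m) hfoldm (by omega)
      rw [show max 0 m = m by omega] at hrun
      have hmem : m ∈ (x :: t).map v := by
        rw [List.map_cons]
        rcases PySem.List.foldl_max_mem (t.map v) (v x) with h1 | h1
        · rw [show m = v x from hm.trans h1]; exact List.mem_cons_self
        · exact List.mem_cons_of_mem _ (by rw [hm]; exact h1)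
      constructor
      · refine ⟨fun _ => hpos, fun _ => ?_⟩
        have hsome : ((x :: t).find? (fun p => decide (v p = m))).isSome := by
          apply List.find?_isSome.mpr
          rcases List.mem_map.mp hmem with ⟨p, hp, hvp⟩
          exact ⟨p, hp, by simp [hvp]⟩
        rcases Option.isSome_iff_exists.mp hsome with ⟨p, hp⟩
        have hpmem : p ∈ x :: t := List.mem_of_find?_eq_some hp
        have hnn := cands_nonneg g row col p (hc ▸ hpmem)
        rw [hrun, hp]
        simp only [Option.getD_some]
        exact ⟨by omega, by omega, by omega⟩
      · intro _
        rw [hrun, getD_index_map v (x :: t) m (0, 0) hmem]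
    · constructor
      · refine ⟨fun hcond => absurd hcond.2.2 (by rw [hfst]; omega), fun h1 => absurd h1 hpos⟩
      · intro h1; exact absurd h1 hpos

theorem loopB_eq_recA (f : Nat) (g : List (List Int)) (row col total : Int) :
    pvLoopB f g row col total = total + pvRecA f g row col := by
  induction f generalizing g row col total with
  | zero => simp [pvLoopB, pvRecA]
  | succ f ih =>
    have h := step_char g row col
    rw [pvLoopB, pvRecA]
    simp only
    by_cases hm : (PySem.List.max? ((pvCandsB g row col).map (fun p => pvGet2 g p.1 p.2)) (fun x => x)).getD 0 > 0
    · rw [if_pos hm, if_pos (h.1.mpr hm), ih, ← h.2 hm]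
      ring
    · rw [if_neg hm, if_neg (fun hcond => hm (h.1.mp hcond))]

-- ===== VERDICT (by name: the statement is the Claim_ definition above) =====
theorem search_carrots_spec : Claim_equal_search_carrots := by
  intro garden row col _ _
  unfold Spec_search_carrots search_carrots search_carrots_alt
  rw [loopB_eq_recA]
  ring
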